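-- pv_equiv track=rewrite | github.com/josephjacks/OpenBBTerminal | openbb_terminal/jupyter/widget_helpers.py | tablinks
-- ===== SOURCE A (Python) =====
-- from typing import List
--
-- def tablinks(tabs: List[str]) -> str:
--     """Adds list of tabs/sections for the reports that are able to be clicked. For every 6 tabs we push them onto a new line.
--
--     Parameters
--     ----------
--     tabs : List[str]
--         List of tabs/sections for the reports.
--
--     Returns
--     -------
--     str
--         HTML code for interactive tabs
--     """
--     htmlcode = '<div class="tab">'
--     for idx, tab in enumerate(tabs):
--         htmlcode += f"""<button class="tablinks" onclick="menu(event, '{tab}')">{tab}</button>"""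
--         if ((idx + 1) % 5) == 0:
--             htmlcode += "</br>"
--     htmlcode += "</div>"
--     return htmlcode
-- ===== SOURCE B (Python) =====
-- from typing import List
--
-- def tablinks(tabs: List[str]) -> str:
--     parts = ['<div class="tab">']
--     for i in range(0, len(tabs), 5):
--         chunk = tabs[i:i + 5]
--         for tab in chunk:
--             parts.append(f"""<button class="tablinks" onclick="menu(event, '{tab}')">{tab}</button>""")
--         if len(chunk) == 5:
--             parts.append("</br>")
--     parts.append("</div>")
--     return "".join(parts)
-- ===== Notes on version B (the rewrite author's own statement) =====
-- stated objective: alternative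
-- what changed: B slices the tabs into rows of 5 with range(0,len,5)/tabs[i:i+5], emits each row's buttons into a parts list, appends '</br>' when the row is full, and joins once at the end, instead of A's single enumerate loop with a modulo test and repeated string concatenation.
import Mathlib
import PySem

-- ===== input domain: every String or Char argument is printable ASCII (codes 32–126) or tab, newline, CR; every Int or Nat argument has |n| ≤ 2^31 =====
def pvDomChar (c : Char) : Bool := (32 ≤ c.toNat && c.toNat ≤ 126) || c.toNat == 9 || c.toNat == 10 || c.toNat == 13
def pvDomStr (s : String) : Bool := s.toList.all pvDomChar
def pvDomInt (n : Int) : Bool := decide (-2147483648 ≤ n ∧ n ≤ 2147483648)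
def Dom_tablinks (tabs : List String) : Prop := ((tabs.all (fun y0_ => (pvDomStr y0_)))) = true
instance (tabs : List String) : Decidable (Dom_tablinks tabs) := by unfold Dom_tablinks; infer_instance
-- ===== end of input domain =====

-- B re-implements the tab builder by slicing rows of 5 and joining a parts list (different decomposition, same output).

-- ===== PORT A =====
-- one <button …>tab</button> element (the f-string text both Pythons share)
def pvBtn (tab : String) : String :=
  "<button class=\"tablinks\" onclick=\"menu(event, '" ++ tab ++ "')\">" ++ tab ++ "</button>"

def tablinks (tabs : List String) : String :=
  let htmlcode := "<div class=\"tab\">"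
  let htmlcode := (PySem.List.enumerate tabs).foldl
    (fun h p =>
      let h := h ++ pvBtn p.2
      if PySem.Int.mod (p.1 + 1) 5 == 0 then h ++ "</br>" else h) htmlcode
  htmlcode ++ "</div>"

-- ===== PORT B =====
-- the parts emitted by B's outer loop: for each slice tabs[i:i+5], its buttons,
-- then "</br>" iff the slice is full; written as recursion on the remaining suffix
def tablinksRows (tabs : List String) : List String :=
  match _h : tabs with
  | [] => []
  | _ :: _ =>
    let chunk := PySem.List.slice tabs (some 0) (some 5)
    chunk.map pvBtn ++ (if chunk.length = 5 then ["</br>"] else []) ++ tablinksRows (tabs.drop 5)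
  termination_by tabs.length
  decreasing_by simp [_h]

def tablinks_alt (tabs : List String) : String :=
  PySem.Str.join "" ("<div class=\"tab\">" :: tablinksRows tabs ++ ["</div>"])

-- ===== PRECONDITION & SPEC =====
def Spec_tablinks (tabs : List String) (out : String) : Prop := out = tablinks_alt tabs
instance (tabs : List String) (out : String) : Decidable (Spec_tablinks tabs out) := by unfold Spec_tablinks; infer_instance

-- ===== CLAIM (what is proved, stated in full; the proofs are below) =====
def Claim_equal_tablinks : Prop := ∀ (tabs : List String), Dom_tablinks tabs → Spec_tablinks tabs (tablinks tabs)

-- ===== LEMMAS AND PROOFS =====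

-- A's loop as a structural recursion carrying the running index
def pvGoA (acc : String) (s : Int) : List String → String
  | [] => acc
  | t :: ts =>
      pvGoA (if PySem.Int.mod (s + 1) 5 == 0 then acc ++ pvBtn t ++ "</br>"
             else acc ++ pvBtn t) (s + 1) ts

theorem pvFoldA_eq (tabs : List String) : ∀ (s : Int) (acc : String),
    (PySem.List.enumerate tabs s).foldl
      (fun h p =>
        let h := h ++ pvBtn p.2
        if PySem.Int.mod (p.1 + 1) 5 == 0 then h ++ "</br>" else h) acc
    = pvGoA acc s tabs := by
  induction tabs with
  | nil => intro s acc; simp [PySem.List.enumerate_nil, pvGoA]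
  | cons t ts ih =>
      intro s acc
      simp only [PySem.List.enumerate_cons, List.foldl_cons, pvGoA]
      split <;> exact ih (s + 1) _

theorem pvJoin_cons (x : String) (xs : List String) :
    PySem.Str.join "" (x :: xs) = x ++ PySem.Str.join "" xs := by
  cases xs <;>
    simp [PySem.Str.join, PySem.Chars.join_nil, PySem.Chars.join_singleton,
      PySem.Chars.join_cons_cons]

theorem pvJoin_append (xs ys : List String) :
    PySem.Str.join "" (xs ++ ys) = PySem.Str.join "" xs ++ PySem.Str.join "" ys := by
  induction xs with
  | nil => simp [PySem.Str.join, PySem.Chars.join_nil]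
  | cons x xs ih => simp [pvJoin_cons, ih, String.append_assoc]

theorem pvJoin_nil : PySem.Str.join "" ([] : List String) = "" := by
  simp [PySem.Str.join, PySem.Chars.join_nil]

theorem pvSlice5 (l : List String) : PySem.List.slice l none (some 5) = l.take 5 := by
  have h := PySem.List.slice_to_natCast (xs := l) (b := 5)
  norm_num at h
  exact h

theorem pvMain (n : Nat) : ∀ (tabs : List String), tabs.length ≤ n →
    ∀ (s : Int) (acc : String), 0 ≤ s → s % 5 = 0 →
    pvGoA acc s tabs = acc ++ PySem.Str.join "" (tablinksRows tabs) := by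
  have hnil : tablinksRows [] = [] := by rw [tablinksRows]
  induction n with
  | zero =>
      intro tabs h s acc _ _
      have : tabs = [] := List.eq_nil_of_length_eq_zero (Nat.le_zero.mp h)
      subst this
      simp [pvGoA, hnil, pvJoin_nil]
  | succ n ih =>
      intro tabs hlen s acc hs hmod
      have d1 : ¬ (5 ∣ (s + 1)) := by omega
      have d2 : ¬ (5 ∣ (s + 1 + 1)) := by omega
      have d3 : ¬ (5 ∣ (s + 1 + 1 + 1)) := by omega
      have d4 : ¬ (5 ∣ (s + 1 + 1 + 1 + 1)) := by omega
      have d5 : (5 ∣ (s + 1 + 1 + 1 + 1 + 1)) := by omega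
      match tabs with
      | [] => simp [pvGoA, hnil, pvJoin_nil]
      | [a] =>
          rw [tablinksRows]
          simp [pvGoA, d1, hnil, pvSlice5, pvJoin_cons, pvJoin_nil]
      | [a, b] =>
          rw [tablinksRows]
          simp [pvGoA, d1, d2, hnil, pvSlice5, pvJoin_cons, pvJoin_nil, String.append_assoc]
      | [a, b, c] =>
          rw [tablinksRows]
          simp [pvGoA, d1, d2, d3, hnil, pvSlice5, pvJoin_cons, pvJoin_nil, String.append_assoc]
      | [a, b, c, d] =>
          rw [tablinksRows]
          simp [pvGoA, d1, d2, d3, d4, hnil, pvSlice5, pvJoin_cons, pvJoin_nil,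
            String.append_assoc]
      | a :: b :: c :: d :: e :: rest =>
          rw [tablinksRows]
          have hrest : rest.length ≤ n := by simp at hlen; omega
          have hrec := ih rest hrest (s + 1 + 1 + 1 + 1 + 1)
            (acc ++ pvBtn a ++ pvBtn b ++ pvBtn c ++ pvBtn d ++ pvBtn e ++ "</br>")
            (by omega) (by omega)
          simp only [pvGoA]
          simp only [show ∀ x : Int, (PySem.Int.mod x 5 == 0) = decide (5 ∣ x) from by
            intro x
            rw [PySem.Int.mod_eq_emod_of_pos (by norm_num)]
            by_cases h : (5:Int) ∣ x <;> simp [h]]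
          simp only [d1, d2, d3, d4, d5, decide_true, decide_false, Bool.false_eq_true,
            if_false, if_true]
          rw [hrec]
          simp [pvSlice5, pvJoin_cons, String.append_assoc]

-- ===== VERDICT (by name: the statement is the Claim_ definition above) =====
theorem tablinks_spec : Claim_equal_tablinks := by
  intro tabs _
  unfold Spec_tablinks tablinks tablinks_alt
  simp only [pvFoldA_eq]
  rw [pvMain tabs.length tabs le_rfl 0 _ le_rfl rfl]
  have e2 : PySem.Str.join "" (["</div>"] : List String) = "</div>" :=
    (pvJoin_cons "</div>" []).trans (by rw [pvJoin_nil]; simp)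
  have e1 : PySem.Str.join "" (tablinksRows tabs ++ ["</div>"])
      = PySem.Str.join "" (tablinksRows tabs) ++ "</div>" :=
    (pvJoin_append (tablinksRows tabs) ["</div>"]).trans
      (congrArg (fun z => PySem.Str.join "" (tablinksRows tabs) ++ z) e2)
  exact (String.append_assoc).trans
    ((pvJoin_cons "<div class=\"tab\">" (tablinksRows tabs ++ ["</div>"])).trans
      (congrArg (fun z => "<div class=\"tab\">" ++ z) e1)).symm
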